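-- pv_equiv track=rewrite | github.com/furmanczyk5/Django-Enterprise-App | knowledgebase/management/commands/csv_transforms/contact.py | handle_first_name
-- ===== SOURCE A (Python) =====
-- PREFIX_NAMES = [
--     'Adm.', 'Admiral',
--     'Gen.', 'General',
--     'Dr.', 'Doctor',
--     'Mrs.', 'Missus', 'Missis', 'Misses',
--     'Ms.', 'Miss',
--     'Mr.', 'Mister',
--     'Rev.', 'Reverend',
--     'Hon.', 'Honorable'
-- ]
--
-- def handle_first_name(first_name, contact):
--     split_name = first_name.split()
--     prefix = get_prefix(first_name)
--
--     if is_single_name(split_name):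
--         contact['first_name'] = first_name
--     elif prefix:
--         split_name = split_prefixed_name(first_name, prefix)
--         contact['prefix_name'] = split_name[0]
--         handle_first_name(split_name[1], contact)
--     elif has_middle_name(split_name):
--         contact['first_name'] = split_name[0]
--         contact['middle_name'] = split_name[1]
--     # Some authors have 3 names for a first name, like Russell Van Nest
--     elif len(split_name) > 2:
--         contact['first_name'] = split_name[0]
--         contact['middle_name'] = ' '.join(split_name[1:])
--
--     return contact
--
-- def is_single_name(split_name):
--     return len(split_name) == 1
--
-- def get_prefix(first_name):
--     for prefix in PREFIX_NAMES:
--         if prefix in first_name: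
--             return prefix
--
-- def split_prefixed_name(first_name, prefix):
--     partition = list(first_name.partition(prefix))
--     first_name = partition.pop().strip()
--     return [''.join(partition).strip(), first_name]
--
-- def has_middle_name(split_name):
--     return len(split_name) == 2
-- ===== SOURCE B (Python) =====
-- PREFIX_NAMES = [
--     'Adm.', 'Admiral',
--     'Gen.', 'General',
--     'Dr.', 'Doctor',
--     'Mrs.', 'Missus', 'Missis', 'Misses',
--     'Ms.', 'Miss',
--     'Mr.', 'Mister',
--     'Rev.', 'Reverend',
--     'Hon.', 'Honorable'
-- ]
--
--
-- def handle_first_name(first_name, contact):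
--     # Iterative version: strip prefixes in a loop, then classify the remainder once.
--     name = first_name
--     while True:
--         if len(name.split()) == 1:
--             contact['first_name'] = name
--             return contact
--         prefix = next((p for p in PREFIX_NAMES if p in name), None)
--         if prefix is None:
--             break
--         idx = name.find(prefix)
--         contact['prefix_name'] = (name[:idx] + prefix).strip()
--         name = name[idx + len(prefix):].strip()
--     parts = name.split()
--     if len(parts) == 2:
--         contact['first_name'], contact['middle_name'] = parts
--     elif len(parts) > 2:
--         contact['first_name'] = parts[0]
--         contact['middle_name'] = ' '.join(parts[1:])
--     return contact
-- ===== Notes on version B (the rewrite author's own statement) =====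
-- stated objective: simpler
-- what changed: Replaces A's tail recursion (which re-splits and re-classifies through a full recursive call after every stripped prefix) with a flat while-loop that only strips prefixes, followed by a single final classification of the remaining name; the partition/join/pop helper dance is inlined as one find-and-slice step.
import Mathlib
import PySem

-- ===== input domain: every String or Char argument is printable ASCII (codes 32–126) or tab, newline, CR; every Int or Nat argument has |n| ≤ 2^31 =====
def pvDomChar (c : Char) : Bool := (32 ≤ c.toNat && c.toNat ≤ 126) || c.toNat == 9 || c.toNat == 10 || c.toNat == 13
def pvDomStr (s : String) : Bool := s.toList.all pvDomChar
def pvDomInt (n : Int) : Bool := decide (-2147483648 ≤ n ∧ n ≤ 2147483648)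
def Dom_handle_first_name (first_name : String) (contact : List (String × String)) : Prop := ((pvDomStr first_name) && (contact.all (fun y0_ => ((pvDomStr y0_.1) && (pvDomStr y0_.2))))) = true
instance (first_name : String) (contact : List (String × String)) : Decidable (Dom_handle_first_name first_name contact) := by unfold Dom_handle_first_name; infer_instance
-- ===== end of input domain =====

-- B replaces A's tail recursion by a flat prefix-stripping loop plus one final classification (objective:
-- simpler). Both Pythons mutate `contact` identically in place; the equivalence proved is about the returned dict.

-- ===== PORT A =====
def pvPrefixNames : List String :=
  ["Adm.", "Admiral", "Gen.", "General", "Dr.", "Doctor",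
   "Mrs.", "Missus", "Missis", "Misses", "Ms.", "Miss",
   "Mr.", "Mister", "Rev.", "Reverend", "Hon.", "Honorable"]

-- get_prefix: the for-loop with early return = first element of PREFIX_NAMES occurring as a substring
def get_prefix (first_name : String) : Option String :=
  pvPrefixNames.find? (fun p => PySem.Str.isIn p first_name)

-- split_prefixed_name: str.partition ported by hand via Chars.find (exact where the separator occurs,
-- which get_prefix guarantees at every call site): before = take i, after = drop (i + |sep|).
def split_prefixed_name (first_name pfx : String) : String × String :=
  let s := first_name.toList
  let p := pfx.toList
  let i := (PySem.Chars.find s p).toNat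
  (String.ofList (PySem.Chars.strip (s.take i ++ p)),
   String.ofList (PySem.Chars.strip (s.drop (i + p.length))))

-- termination helper for both ports: the stripped remainder after a found prefix is strictly shorter
theorem pv_rest_lt (name p : String) (h : get_prefix name = some p) :
    (PySem.Chars.strip (name.toList.drop
      ((PySem.Chars.find name.toList p.toList).toNat + p.toList.length))).length
      < name.toList.length := by
  have h' : pvPrefixNames.find? (fun q => PySem.Str.isIn q name) = some p := h
  have hmem : p ∈ pvPrefixNames := List.mem_of_find?_eq_some h'
  have hin : PySem.Str.isIn p name = true := by
    have := List.find?_some h'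
    simpa using this
  have hplen : 1 ≤ p.toList.length := by fin_cases hmem <;> decide
  have hfind : 0 ≤ PySem.Chars.find name.toList p.toList := by
    rw [PySem.Chars.find_nonneg_iff]
    exact (PySem.Str.isIn_iff_infix p name).mp hin
  obtain ⟨hpre, -⟩ := PySem.Chars.find_spec hfind
  have hbound := hpre.length_le
  rw [List.length_drop] at hbound
  have hstrip : ∀ l : List Char, (PySem.Chars.strip l).length ≤ l.length := by
    intro l
    have h1 := List.length_dropWhile_le (p := PySem.Chars.isspace)
      (l := (List.dropWhile PySem.Chars.isspace l).reverse)
    have h2 := List.length_dropWhile_le (p := PySem.Chars.isspace) (l := l)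
    simp only [PySem.Chars.strip, PySem.Chars.rstrip, PySem.Chars.lstrip,
      List.length_reverse] at *
    omega
  have h3 := hstrip (name.toList.drop
      ((PySem.Chars.find name.toList p.toList).toNat + p.toList.length))
  rw [List.length_drop] at h3
  omega

-- the recursive body of A, on the dict (the List↔Dict wrapping is the type convention's)
def handle_first_nameD (first_name : String) (contact : PySem.Dict String String) :
    PySem.Dict String String :=
  let split_name := PySem.Str.split₀ first_name
  if split_name.length = 1 then
    PySem.Dict.insert contact "first_name" first_name
  else
    match h : get_prefix first_name with
    | some p =>
        let sp := split_prefixed_name first_name p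
        handle_first_nameD sp.2 (PySem.Dict.insert contact "prefix_name" sp.1)
    | none =>
        if split_name.length = 2 then
          PySem.Dict.insert (PySem.Dict.insert contact "first_name" (split_name.getD 0 ""))
            "middle_name" (split_name.getD 1 "")
        else if split_name.length > 2 then
          PySem.Dict.insert (PySem.Dict.insert contact "first_name" (split_name.getD 0 ""))
            "middle_name" (PySem.Str.join " " (PySem.List.slice split_name (some 1) none))
        else contact
termination_by first_name.toList.length
decreasing_by
  simp only [split_prefixed_name, String.toList_ofList]
  exact pv_rest_lt first_name p h

def handle_first_name (first_name : String) (contact : List (String × String)) :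
    List (String × String) :=
  (handle_first_nameD first_name (PySem.Dict.mk contact)).items

-- ===== PORT B =====
-- the while-loop of Source B: strips prefixes, returning either the finished dict (the single-name
-- `return contact`) or the remaining name still to classify (the `break`)
def altStrip (name : String) (contact : PySem.Dict String String) :
    Sum (PySem.Dict String String) (String × PySem.Dict String String) :=
  if (PySem.Str.split₀ name).length = 1 then
    Sum.inl (PySem.Dict.insert contact "first_name" name)
  else
    match h : get_prefix name with   -- next((p for p in PREFIX_NAMES if p in name), None)
    | none => Sum.inr (name, contact)
    | some p =>
        let idx := (PySem.Str.find name p).toNat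
        -- contact['prefix_name'] = (name[:idx] + prefix).strip()
        let pref := String.ofList (PySem.Chars.strip (name.toList.take idx ++ p.toList))
        -- name = name[idx + len(prefix):].strip()
        let rest := String.ofList (PySem.Chars.strip (name.toList.drop (idx + p.toList.length)))
        altStrip rest (PySem.Dict.insert contact "prefix_name" pref)
termination_by name.toList.length
decreasing_by
  simp only [String.toList_ofList]
  exact pv_rest_lt name p h

def handle_first_name_alt (first_name : String) (contact : List (String × String)) :
    List (String × String) :=
  (match altStrip first_name (PySem.Dict.mk contact) with
   | Sum.inl c => c
   | Sum.inr (name, c) =>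
     match PySem.Str.split₀ name with
     | [a, b] =>
         PySem.Dict.insert (PySem.Dict.insert c "first_name" a) "middle_name" b
     | a :: b :: rest =>
         PySem.Dict.insert (PySem.Dict.insert c "first_name" a)
           "middle_name" (PySem.Str.join " " (b :: rest))
     | _ => c).items

-- ===== PRECONDITION & SPEC =====
def Spec_handle_first_name (first_name : String) (contact : List (String × String)) (out : List (String × String)) : Prop := out = handle_first_name_alt first_name contact
instance (first_name : String) (contact : List (String × String)) (out : List (String × String)) : Decidable (Spec_handle_first_name first_name contact out) := by unfold Spec_handle_first_name; infer_instance

-- ===== CLAIM (what is proved, stated in full; the proofs are below) =====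
def Claim_equal_handle_first_name : Prop := ∀ (first_name : String) (contact : List (String × String)), Dom_handle_first_name first_name contact → Spec_handle_first_name first_name contact (handle_first_name first_name contact)

-- ===== LEMMAS AND PROOFS =====

-- B's post-loop classification of the remaining name
def pvClassify (x : Sum (PySem.Dict String String) (String × PySem.Dict String String)) :
    PySem.Dict String String :=
  match x with
  | Sum.inl c => c
  | Sum.inr (name, c) =>
    match PySem.Str.split₀ name with
    | [a, b] =>
        PySem.Dict.insert (PySem.Dict.insert c "first_name" a) "middle_name" b
    | a :: b :: rest =>
        PySem.Dict.insert (PySem.Dict.insert c "first_name" a)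
          "middle_name" (PySem.Str.join " " (b :: rest))
    | _ => c

theorem pv_main (k : Nat) : ∀ (name : String) (contact : PySem.Dict String String),
    name.toList.length = k →
    handle_first_nameD name contact = pvClassify (altStrip name contact) := by
  induction k using Nat.strong_induction_on with
  | _ k ih =>
    intro name contact hk
    rw [handle_first_nameD, altStrip]
    by_cases h1 : (PySem.Str.split₀ name).length = 1
    · simp [h1, pvClassify]
    · simp only [h1, if_false]
      cases hp : get_prefix name with
      | some p =>
          split
          case h_2 hq => exact absurd hq (by simp)
          case h_1 q hq =>
          injection hq with e
          split
          case h_1 hq2 => exact absurd hq2 (by simp)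
          case h_2 q2 hq2 =>
          injection hq2 with e2
          rw [← e, ← e2]
          have hlt := pv_rest_lt name p hp
          have hlt2 : (split_prefixed_name name p).2.toList.length < k := by
            simp only [split_prefixed_name, String.toList_ofList]
            omega
          rw [ih _ hlt2 _ _ rfl]
          simp [split_prefixed_name, PySem.Str.find]
      | none =>
          simp only [pvClassify]
          cases hs : PySem.Str.split₀ name with
          | nil => simp
          | cons a t =>
            cases t with
            | nil => simp [hs] at h1
            | cons b t2 =>
              cases t2 with
              | nil => simp
              | cons c t3 =>
                rw [PySem.List.slice_from _ (by norm_num : (0:Int) ≤ 1)]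
                simp [List.getD]

-- ===== VERDICT (by name: the statement is the Claim_ definition above) =====
theorem handle_first_name_spec : Claim_equal_handle_first_name := by
  intro first_name contact _
  unfold Spec_handle_first_name handle_first_name handle_first_name_alt
  rw [pv_main _ first_name (PySem.Dict.mk contact) rfl]
  rfl
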